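-- pv_equiv track=rewrite | github.com/hesamsheikh/AnimAI-Trainer | utils/code_utils.py | inject_overlap_check
-- ===== SOURCE A (Python) =====
-- def inject_overlap_check(code_string):
--     """
--     Injects overlap checking code after self.play calls, except for FadeOut.
--     """
--     lines = code_string.split('\n')
--     modified_lines = []
--     i = 0
--     line_number = 0  # Track actual line numbers
--
--
--     while i < len(lines):
--         line = lines[i]
--         modified_lines.append(line)
--         line_number += 1
--
--         # Functions that we don't want to check for overlaps after
--         ignore_functions = ['FadeOut']
--
--         # Check if line contains self.play and none of the ignored functions
--         if 'self.play' in line and not any(func in line for func in ignore_functions):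
--             # Look ahead to find the end of the self.play statement
--             next_i = i + 1
--             open_parens = line.count('(') - line.count(')')
--
--             while open_parens > 0 and next_i < len(lines):
--                 modified_lines.append(lines[next_i])
--                 line_number += 1
--                 open_parens += lines[next_i].count('(') - lines[next_i].count(')')
--                 i = next_i
--                 next_i += 1
--
--             # Get the indentation of the self.play line
--             indentation = len(line) - len(line.lstrip())
--             indent = ' ' * indentation
--
--             # Add a blank line before overlap check
--             modified_lines.append("")
--             # Add the overlap check with proper indentation and line number capture
--             modified_lines.append(f"{indent}self.overlap_objects = check_mobject_overlaps(self)")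
--             modified_lines.append(f"{indent}if self.overlap_objects:")
--             modified_lines.append(f"{indent}    self.overlap_line = {line_number}")  # Store line number
--             modified_lines.append(f"{indent}    return")
--             # Add a blank line after overlap check
--             modified_lines.append("")
--             line_number += 6  # Account for the added lines
--
--         i += 1
--
--     return '\n'.join(modified_lines)
-- ===== SOURCE B (Python) =====
-- def _statement_blocks(lines):
--     """Fold physical lines into statement blocks: a self.play line (without an
--     ignored function) absorbs following lines while its parens stay unbalanced."""
--     blocks = []
--     i = 0
--     n = len(lines)
--     while i < n:
--         head = lines[i]
--         j = i + 1
--         if 'self.play' in head and 'FadeOut' not in head: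
--             bal = head.count('(') - head.count(')')
--             while bal > 0 and j < n:
--                 bal += lines[j].count('(') - lines[j].count(')')
--                 j += 1
--         blocks.append(lines[i:j])
--         i = j
--     return blocks
--
--
-- def inject_overlap_check(code_string):
--     out = []
--     for block in _statement_blocks(code_string.split('\n')):
--         out.extend(block)
--         first = block[0]
--         if 'self.play' in first and 'FadeOut' not in first:
--             ln = len(out)
--             indent = ' ' * (len(first) - len(first.lstrip()))
--             out.append("")
--             out.append(indent + "self.overlap_objects = check_mobject_overlaps(self)")
--             out.append(indent + "if self.overlap_objects:")
--             out.append(indent + "    self.overlap_line = " + str(ln))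
--             out.append(indent + "    return")
--             out.append("")
--     return '\n'.join(out)
-- ===== Notes on version B (the rewrite author's own statement) =====
-- stated objective: alternative
-- what changed: Replaced A's single index-juggling scan with a hand-tracked line counter by a two-pass decomposition: a pre-pass folds the lines into paren-balanced statement blocks (absorbing continuations of self.play statements), and an emission pass appends each block and injects the overlap check after trigger blocks, using the output length as the line number.
import Mathlib
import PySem

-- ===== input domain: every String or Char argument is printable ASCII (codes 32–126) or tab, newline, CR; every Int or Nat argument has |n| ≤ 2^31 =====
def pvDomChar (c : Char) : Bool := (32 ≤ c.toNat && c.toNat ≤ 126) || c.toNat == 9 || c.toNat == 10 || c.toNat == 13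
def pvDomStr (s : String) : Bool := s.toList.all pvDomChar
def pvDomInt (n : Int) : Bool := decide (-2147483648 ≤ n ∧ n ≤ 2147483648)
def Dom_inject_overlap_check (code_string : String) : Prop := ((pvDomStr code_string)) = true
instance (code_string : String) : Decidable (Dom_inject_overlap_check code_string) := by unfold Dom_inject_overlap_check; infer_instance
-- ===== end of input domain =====

-- B re-decomposes A's single index-juggling scan into a statement-block pre-pass plus an
-- emission pass that uses the output length as the line number (objective: alternative decomposition).

-- shared small helpers (identical expressions in both Pythons)
def pvBal (l : String) : Int := (PySem.Str.count l "(" : Int) - (PySem.Str.count l ")" : Int)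
def pvTrig (l : String) : Bool := PySem.Str.isIn "self.play" l && !(PySem.Str.isIn "FadeOut" l)
def pvIndent (l : String) : String :=
  String.ofList (List.replicate (PySem.Str.len l - PySem.Str.len (PySem.Str.lstrip l)).toNat ' ')
def pvInj (indent : String) (ln : Int) : List String :=
  [ "",
    indent ++ "self.overlap_objects = check_mobject_overlaps(self)",
    indent ++ "if self.overlap_objects:",
    indent ++ "    self.overlap_line = " ++ PySem.Int.toStr ln,
    indent ++ "    return",
    "" ]

-- ===== PORT A =====
-- inner 'while open_parens > 0 and next_i < len(lines)' loop: appends lines as it consumes them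
def pvInnerA (op : Int) (rest : List String) (acc : List String) (ln : Int) :
    List String × List String × Int :=
  if op > 0 then
    match rest with
    | [] => (acc, [], ln)
    | x :: r => pvInnerA (op + pvBal x) r (acc ++ [x]) (ln + 1)
  else (acc, rest, ln)
termination_by rest.length
decreasing_by simp

theorem pvInnerA_rest_le (op : Int) (rest acc : List String) (ln : Int) :
    (pvInnerA op rest acc ln).2.1.length ≤ rest.length := by
  induction rest generalizing op acc ln with
  | nil => rw [pvInnerA]; split_ifs <;> simp
  | cons x r ih =>
    rw [pvInnerA]
    split_ifs
    · exact le_trans (ih _ _ _) (by simp)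
    · simp

-- outer 'while i < len(lines)' loop of A, over the remaining lines
def pvLoopA (lines acc : List String) (ln : Int) : List String :=
  match lines with
  | [] => acc
  | line :: rest =>
    let acc1 := acc ++ [line]
    let ln1 := ln + 1
    if pvTrig line then
      let r := pvInnerA (pvBal line) rest acc1 ln1
      pvLoopA r.2.1 (r.1 ++ pvInj (pvIndent line) r.2.2) (r.2.2 + 6)
    else pvLoopA rest acc1 ln1
termination_by lines.length
decreasing_by
  · exact Nat.lt_succ_of_le (pvInnerA_rest_le _ _ _ _)
  · simp

def inject_overlap_check (code_string : String) : String :=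
  PySem.Str.join "\n" (pvLoopA ((PySem.Str.split? code_string "\n").getD []) [] 0)

-- ===== PORT B =====
-- continuation lines absorbed by an unbalanced trigger line (the inner scan of _statement_blocks)
def pvGrab (op : Int) (rest : List String) : List String × List String :=
  if op > 0 then
    match rest with
    | [] => ([], [])
    | x :: r =>
      let g := pvGrab (op + pvBal x) r
      (x :: g.1, g.2)
  else ([], rest)
termination_by rest.length
decreasing_by simp

theorem pvGrab_rest_le (op : Int) (rest : List String) :
    (pvGrab op rest).2.length ≤ rest.length := by
  induction rest generalizing op with
  | nil => rw [pvGrab]; split_ifs <;> simp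
  | cons x r ih =>
    rw [pvGrab]
    split_ifs
    · exact le_trans (ih _) (by simp)
    · simp

-- pre-pass: fold the physical lines into statement blocks
def pvBlocksB (lines : List String) : List (List String) :=
  match lines with
  | [] => []
  | head :: rest =>
    if pvTrig head then
      let g := pvGrab (pvBal head) rest
      (head :: g.1) :: pvBlocksB g.2
    else [head] :: pvBlocksB rest
termination_by lines.length
decreasing_by
  · exact Nat.lt_succ_of_le (pvGrab_rest_le _ _)
  · simp

-- emission pass: append each block, inject after trigger blocks using the output length
def pvEmitB : List (List String) → List String → List String
  | [], out => out
  | blk :: bs, out =>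
    let out1 := out ++ blk
    match blk with
    | [] => pvEmitB bs out1          -- unreachable: blocks are never empty
    | first :: _ =>
      if pvTrig first then
        pvEmitB bs (out1 ++ pvInj (pvIndent first) (out1.length : Int))
      else pvEmitB bs out1

def inject_overlap_check_alt (code_string : String) : String :=
  PySem.Str.join "\n" (pvEmitB (pvBlocksB ((PySem.Str.split? code_string "\n").getD [])) [])

-- ===== PRECONDITION & SPEC =====
def Spec_inject_overlap_check (code_string : String) (out : String) : Prop := out = inject_overlap_check_alt code_string
instance (code_string : String) (out : String) : Decidable (Spec_inject_overlap_check code_string out) := by unfold Spec_inject_overlap_check; infer_instance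

-- ===== CLAIM (what is proved, stated in full; the proofs are below) =====
def Claim_equal_inject_overlap_check : Prop := ∀ (code_string : String), Dom_inject_overlap_check code_string → Spec_inject_overlap_check code_string (inject_overlap_check code_string)

-- ===== LEMMAS AND PROOFS =====

-- A's inner loop is B's pvGrab with the taken lines appended and the counter advanced
theorem pvInnerA_eq_grab (rest : List String) : ∀ (op : Int) (acc : List String) (ln : Int),
    pvInnerA op rest acc ln =
      (acc ++ (pvGrab op rest).1, (pvGrab op rest).2, ln + ((pvGrab op rest).1.length : Int)) := by
  induction rest with
  | nil =>
    intro op acc ln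
    rw [pvInnerA, pvGrab]
    split_ifs <;> simp
  | cons x r ih =>
    intro op acc ln
    rw [pvInnerA, pvGrab]
    split_ifs
    · rw [ih]
      simp
      omega
    · simp

-- main invariant: when the tracked line number equals the output length, A's loop is B's two passes
theorem pvLoop_eq_emit : ∀ (n : Nat) (lines acc : List String), lines.length ≤ n →
    pvLoopA lines acc (acc.length : Int) = pvEmitB (pvBlocksB lines) acc := by
  intro n
  induction n with
  | zero =>
    intro lines acc h
    have : lines = [] := List.eq_nil_of_length_eq_zero (Nat.le_zero.mp h)
    subst this
    rw [pvLoopA, pvBlocksB, pvEmitB]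
  | succ m ih =>
    intro lines acc h
    match lines with
    | [] => rw [pvLoopA, pvBlocksB, pvEmitB]
    | line :: rest =>
      rw [pvLoopA, pvBlocksB]
      by_cases ht : pvTrig line = true
      · simp only [ht, if_true]
        rw [pvInnerA_eq_grab]
        simp only [pvEmitB]
        simp only [ht, if_true]
        have hlen1 : ((acc.length : Int) + 1 + (((pvGrab (pvBal line) rest).1.length : Int)))
            = (((acc ++ line :: (pvGrab (pvBal line) rest).1).length : Int)) := by
          simp; omega
        rw [hlen1]
        have hacc : (acc ++ [line]) ++ (pvGrab (pvBal line) rest).1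
            = acc ++ line :: (pvGrab (pvBal line) rest).1 := by simp
        rw [hacc]
        have hlen2 : ((acc ++ line :: (pvGrab (pvBal line) rest).1).length : Int) + 6
            = (((acc ++ line :: (pvGrab (pvBal line) rest).1)
                ++ pvInj (pvIndent line) ((acc ++ line :: (pvGrab (pvBal line) rest).1).length : Int)).length : Int) := by
          simp [pvInj]; omega
        rw [hlen2]
        exact ih _ _ (by
          have := pvGrab_rest_le (pvBal line) rest
          simp at h
          omega)
      · simp only [ht, Bool.false_eq_true, if_false, pvEmitB]
        have : (acc.length : Int) + 1 = ((acc ++ [line]).length : Int) := by simp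
        rw [this]
        exact ih _ _ (by simp at h ⊢; omega)

-- ===== VERDICT (by name: the statement is the Claim_ definition above) =====
theorem inject_overlap_check_spec : Claim_equal_inject_overlap_check := by
  intro code_string _
  unfold Spec_inject_overlap_check inject_overlap_check inject_overlap_check_alt
  rw [show (0 : Int) = (([] : List String).length : Int) by simp]
  rw [pvLoop_eq_emit ((PySem.Str.split? code_string "\n").getD []).length _ _ le_rfl]
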